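-- pv_equiv track=rewrite | github.com/va64doman/codility | Challenges/fast&Curious.py | newMotorway
-- ===== SOURCE A (Python) =====
-- def newMotorway(A):
--     N = len(A)
--     cost = 0
--     for i in range(1,N): cost += A[N-1] - A[i]
--     best = cost
--     for X in range(N-1):
--         cost -= A[N-1] - A[X+1]
--         cost += (X+1) * (A[X+1] - A[X])
--         best = min(best, cost)
--     return best % (10**9 + 7)
--     pass
-- ===== SOURCE B (Python) =====
-- def newMotorway(A):
--     N = len(A)
--     if N == 0:
--         return 0
--     # prefix sums: pre[k] = A[0] + ... + A[k-1]
--     pre = [0]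
--     s = 0
--     for v in A:
--         s += v
--         pre.append(s)
--     total = s
--     last = A[N - 1]
--     best = None
--     for p in range(N):
--         # closed-form cost of pivot p (p = 0 is the baseline)
--         c = (N - 1 - p) * last - (total - pre[p + 1]) + p * A[p] - pre[p]
--         if best is None or c < best:
--             best = c
--     return best % (10**9 + 7)
-- ===== Notes on version B (the rewrite author's own statement) =====
-- stated objective: alternative
-- what changed: B evaluates each pivot's cost independently by a closed form over a precomputed prefix-sum table, instead of A's incremental delta maintenance of a running cost.
import Mathlib
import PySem

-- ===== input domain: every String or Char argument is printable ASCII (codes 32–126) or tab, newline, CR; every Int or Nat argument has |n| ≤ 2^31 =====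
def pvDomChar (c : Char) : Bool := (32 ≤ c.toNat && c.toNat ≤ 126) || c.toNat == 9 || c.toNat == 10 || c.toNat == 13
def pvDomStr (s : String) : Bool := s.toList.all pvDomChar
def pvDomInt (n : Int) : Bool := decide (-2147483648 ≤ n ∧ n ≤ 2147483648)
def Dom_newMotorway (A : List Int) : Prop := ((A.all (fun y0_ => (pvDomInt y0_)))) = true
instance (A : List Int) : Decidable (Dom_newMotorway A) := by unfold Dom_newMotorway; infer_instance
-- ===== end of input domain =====

-- B replaces A's incremental sliding-cost update by independent closed-form
-- evaluation of each pivot's cost from a prefix-sum table (alternative decomposition, same O(n) cost).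

-- ===== PORT A =====
-- Literal port of Source A. Indices in both loops are always in range, so pyGetD's
-- default 0 is never used.
def newMotorway (A : List Int) : Int :=
  let N : Int := A.length
  let cost : Int := (PySem.List.pyRange 1 N 1).foldl
    (fun c i => c + (PySem.List.pyGetD A (N-1) 0 - PySem.List.pyGetD A i 0)) 0
  let st := (PySem.List.pyRange 0 (N-1) 1).foldl
    (fun (s : Int × Int) X =>
      let c := s.1 - (PySem.List.pyGetD A (N-1) 0 - PySem.List.pyGetD A (X+1) 0)
      let c := c + (X+1) * (PySem.List.pyGetD A (X+1) 0 - PySem.List.pyGetD A X 0)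
      (c, min s.2 c)) (cost, cost)
  PySem.Int.mod st.2 (10^9+7)

-- ===== PORT B =====
-- Literal port of Source B. `best` is Python's None-initialised running minimum;
-- the final match's `none => 0` arm is unreachable (the loop runs at least once when N ≠ 0).
def newMotorway_alt (A : List Int) : Int :=
  let N : Int := A.length
  if N = 0 then 0 else
  let st := A.foldl (fun (st : List Int × Int) v => (st.1 ++ [st.2 + v], st.2 + v)) ([0], 0)
  let pre := st.1
  let total := st.2
  let last := PySem.List.pyGetD A (N-1) 0
  let best := (PySem.List.pyRange 0 N 1).foldl
    (fun (b : Option Int) p =>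
      let c := (N-1-p)*last - (total - PySem.List.pyGetD pre (p+1) 0)
               + p * PySem.List.pyGetD A p 0 - PySem.List.pyGetD pre p 0
      match b with
      | none => some c
      | some b' => if c < b' then some c else some b') none
  PySem.Int.mod (match best with | some b => b | none => 0) (10^9+7)

-- ===== PRECONDITION & SPEC =====
def Spec_newMotorway (A : List Int) (out : Int) : Prop := out = newMotorway_alt A
instance (A : List Int) (out : Int) : Decidable (Spec_newMotorway A out) := by unfold Spec_newMotorway; infer_instance

-- ===== CLAIM (what is proved, stated in full; the proofs are below) =====
def Claim_equal_newMotorway : Prop := ∀ (A : List Int), Dom_newMotorway A → Spec_newMotorway A (newMotorway A)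

-- ===== LEMMAS AND PROOFS =====

def pvC (A : List Int) (p : Nat) : Int :=
  ((A.length : Int) - 1 - (p : Int)) * A.getD (A.length - 1) 0
    - (A.drop (p+1)).sum + (p : Int) * A.getD p 0 - (A.take p).sum

lemma pvFoldSub (last : Int) : ∀ (l : List Int) (init : Int),
    l.foldl (fun c v => c + (last - v)) init = init + (l.length : Int) * last - l.sum := by
  intro l
  induction l with
  | nil => intro init; simp
  | cons x t ih => intro init; simp only [List.foldl_cons, ih, List.length_cons, List.sum_cons]
                   push_cast; ring

lemma pvPreSpec : ∀ (xs acc : List Int) (s : Int),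
    xs.foldl (fun (st : List Int × Int) v => (st.1 ++ [st.2 + v], st.2 + v)) (acc, s)
    = (acc ++ (List.range xs.length).map (fun k => s + (xs.take (k+1)).sum), s + xs.sum) := by
  intro xs
  induction xs with
  | nil => intro acc s; simp
  | cons x t ih =>
    intro acc s
    simp only [List.foldl_cons]
    rw [ih]
    refine Prod.ext ?_ (by simp [add_assoc])
    simp only [List.length_cons, List.range_succ_eq_map, List.map_cons, List.map_map]
    simp [Function.comp, List.append_assoc, add_assoc]

lemma pvC_succ (A : List Int) (k : Nat) (hk : k + 1 < A.length) :
    pvC A k - (A.getD (A.length-1) 0 - A.getD (k+1) 0) + ((k:Int)+1) * (A.getD (k+1) 0 - A.getD k 0)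
    = pvC A (k+1) := by
  have hk' : k < A.length := by omega
  unfold pvC
  rw [List.drop_eq_getElem_cons hk, List.sum_take_succ A k hk']
  have hg : A.getD (k+1) 0 = A[k+1] := List.getD_eq_getElem A 0 hk
  rw [List.getD_eq_getElem A 0 hk', hg]
  simp only [List.sum_cons]
  push_cast
  ring

lemma pvAfold (A : List Int) (h1 : 1 ≤ A.length) : ∀ (m : Nat), m ≤ A.length - 1 →
    (PySem.List.pyRange 0 (m:Int) 1).foldl
      (fun (s : Int × Int) X =>
        (s.1 - (PySem.List.pyGetD A ((A.length:Int)-1) 0 - PySem.List.pyGetD A (X+1) 0)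
           + (X+1) * (PySem.List.pyGetD A (X+1) 0 - PySem.List.pyGetD A X 0),
         min s.2 (s.1 - (PySem.List.pyGetD A ((A.length:Int)-1) 0 - PySem.List.pyGetD A (X+1) 0)
           + (X+1) * (PySem.List.pyGetD A (X+1) 0 - PySem.List.pyGetD A X 0)))) (pvC A 0, pvC A 0)
    = (pvC A m, (List.range m).foldl (fun b k => min b (pvC A (k+1))) (pvC A 0)) := by
  intro m
  induction m with
  | zero => intro _; rw [show ((0:Nat):Int) = 0 by norm_num, PySem.List.pyRange_one_eq_nil (by norm_num)]; simp
  | succ m ih =>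
    intro hm
    rw [show (((m+1:Nat)):Int) = (m:Int) + 1 by push_cast; ring,
        PySem.List.pyRange_one_succ_right (by positivity), List.foldl_append,
        ih (by omega), List.foldl_cons, List.foldl_nil]
    have hc1 : ((A.length:Int) - 1) = ((A.length - 1 : Nat) : Int) := by omega
    have hc2 : ((m:Int) + 1) = ((m + 1 : Nat) : Int) := by push_cast; ring
    simp only [hc1, hc2, PySem.List.pyGetD_natCast]
    have hrec : pvC A m - (A.getD (A.length - 1) 0 - A.getD (m + 1) 0)
        + (((m+1:Nat)):Int) * (A.getD (m + 1) 0 - A.getD m 0) = pvC A (m + 1) := by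
      rw [show (((m+1:Nat)):Int) = (m:Int)+1 by push_cast; ring]
      exact pvC_succ A m (by omega)
    rw [List.range_succ, List.foldl_append, List.foldl_cons, List.foldl_nil]
    exact Prod.ext (by simp only []; rw [← hrec]) (by simp only []; congr 1)

lemma pvOptFold (f : Int → Int) : ∀ (l : List Int) (b : Int),
    l.foldl (fun ob p =>
      let c := f p
      match ob with
      | none => some c
      | some b' => if c < b' then some c else some b') (some b)
    = some (l.foldl (fun b' p => min b' (f p)) b) := by
  intro l
  induction l with
  | nil => intro b; rfl
  | cons x t ih =>
    intro b
    simp only [List.foldl_cons]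
    rw [← ih]
    congr 1
    by_cases h : f x < b
    · simp [h, min_def]
    · simp [h, min_def]

lemma pvA_eq (A : List Int) (hA : 1 ≤ A.length) :
    newMotorway A = PySem.Int.mod
      ((List.range (A.length - 1)).foldl (fun b k => min b (pvC A (k+1))) (pvC A 0)) (10^9+7) := by
  simp only [newMotorway]
  have hc1 : ((A.length:Int) - 1) = ((A.length - 1 : Nat) : Int) := by omega
  have hcost : (PySem.List.pyRange 1 (A.length:Int) 1).foldl
      (fun c i => c + (PySem.List.pyGetD A ((A.length:Int)-1) 0 - PySem.List.pyGetD A i 0)) 0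
      = pvC A 0 := by
    rw [PySem.List.foldl_pyRange_pyGetD' A 0
      (fun c v => c + (PySem.List.pyGetD A ((A.length:Int)-1) 0 - v)) 0 (by norm_num : (0:Int) ≤ 1)]
    rw [pvFoldSub]
    simp only [pvC, hc1, PySem.List.pyGetD_natCast]
    push_cast [List.length_drop]
    have : ((A.length - 1 : Nat) : Int) = (A.length : Int) - 1 := by omega
    rw [this]
    simp
  rw [hcost]
  rw [show PySem.List.pyRange 0 ((A.length:Int)-1) 1
        = PySem.List.pyRange 0 ((A.length - 1 : Nat) : Int) 1 by rw [hc1]]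
  rw [pvAfold A hA (A.length - 1) (le_refl _)]

lemma pvOptFoldNone (f : Int → Int) (x : Int) (l : List Int) :
    (x :: l).foldl (fun ob p =>
      match ob with
      | none => some (f p)
      | some b' => if f p < b' then some (f p) else some b') none
    = some (l.foldl (fun b' p => min b' (f p)) (f x)) := by
  simp only [List.foldl_cons]
  exact pvOptFold f l (f x)

lemma pvE_eq (A : List Int) (hA : 1 ≤ A.length) (p : Int) (h0 : 0 ≤ p) (hp : p < (A.length : Int)) :
    ((A.length:Int) - 1 - p) * PySem.List.pyGetD A ((A.length:Int)-1) 0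
      - ((0 + A.sum) - PySem.List.pyGetD ((List.range (A.length+1)).map (fun j => ((A.take j).sum : Int))) (p+1) 0)
      + p * PySem.List.pyGetD A p 0
      - PySem.List.pyGetD ((List.range (A.length+1)).map (fun j => ((A.take j).sum : Int))) p 0
    = pvC A p.toNat := by
  obtain ⟨k, rfl⟩ : ∃ k : Nat, p = (k : Int) := ⟨p.toNat, (Int.toNat_of_nonneg h0).symm⟩
  have hk : k < A.length := by omega
  have hc1 : ((A.length:Int) - 1) = ((A.length - 1 : Nat) : Int) := by omega
  have hc2 : ((k:Int) + 1) = ((k+1 : Nat) : Int) := by push_cast; ring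
  rw [hc1, hc2]
  simp only [PySem.List.pyGetD_natCast, Int.toNat_natCast]
  rw [PySem.List.getD_map_range _ _ _ _ (by omega), PySem.List.getD_map_range _ _ _ _ (by omega)]
  have hsum := List.sum_take_add_sum_drop A (k+1)
  unfold pvC
  rw [← hsum, hc1]
  ring

lemma pvB_eq (A : List Int) (hA : 1 ≤ A.length) :
    newMotorway_alt A = PySem.Int.mod
      ((List.range (A.length - 1)).foldl (fun b k => min b (pvC A (k+1))) (pvC A 0)) (10^9+7) := by
  simp only [newMotorway_alt]
  rw [if_neg (by omega : ¬((A.length : Int) = 0))]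
  rw [pvPreSpec A [0] 0]
  have hpre : ([(0:Int)] ++ (List.range A.length).map (fun k => 0 + (A.take (k+1)).sum))
      = (List.range (A.length+1)).map (fun j => ((A.take j).sum : Int)) := by
    rw [List.range_succ_eq_map]
    simp [List.map_map, Function.comp]
  simp only [hpre]
  rw [PySem.List.pyRange_one_cons (by omega : (0:Int) < (A.length : Int)), pvOptFoldNone]
  simp only []
  have htn : ((A.length:Int) - 1).toNat = A.length - 1 := by omega
  have hE0 := pvE_eq A hA 0 (by norm_num) (by omega)
  rw [hE0, show ((0:Int)).toNat = 0 from rfl,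
      show ((0:Int) + 1) = 1 by norm_num,
      PySem.List.pyRange_one 1 (A.length:Int), List.foldl_map, htn]
  congr 1
  refine PySem.List.foldl_congr_mem _ _ _ _ ?_
  intro acc k hk
  have hklt : k < A.length - 1 := List.mem_range.mp hk
  have hE := pvE_eq A hA (1 + (k:Int)) (by positivity) (by omega)
  rw [hE, show ((1 + (k:Int))).toNat = k + 1 by omega]

lemma pvMain (A : List Int) : newMotorway A = newMotorway_alt A := by
  by_cases hA : A = []
  · subst hA; rfl
  · have h1 : 1 ≤ A.length := List.length_pos_iff.mpr hA
    rw [pvA_eq A h1, pvB_eq A h1]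

-- ===== VERDICT (by name: the statement is the Claim_ definition above) =====
theorem newMotorway_spec : Claim_equal_newMotorway := by
  intro A _
  unfold Spec_newMotorway
  exact pvMain A
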